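-- pv_equiv track=rewrite | github.com/miliar/Code_Jam_Webscraper | solutions_python/solutions_year16_round0_nr3/2135.py | solve
-- ===== SOURCE A (Python) =====
-- import copy
--
-- def generateBounds(N):
--   if N < 2:
--     return [[''], ['']]
--   start = ['1']
--   end = ['1']
--   while len(start) < N-1:
--     start.append('0')
--   start.append('1')
--   while len(end) < N-1:
--     end.append('1')
--   end.append('1')
--   return [start, end]
--
-- def binaryStringToBase(string, base):
--   result = 0
--   for ch in string:
--     result *= base
--     result += int(ch)
--   return result
--
-- def binaryStringIncrement(string):
--   for i in range(len(string) - 2, -1, -1):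
--     if string[i] == '0':
--       string[i] = '1'
--       break
--     else:
--       string[i] = '0'
--   return string
--
-- def findPrimes(N):
--   primes = [2, 3]
--   for i in range (primes[-1] + 2, N, 2):
--     isPrime = True
--     for prime in primes:
--       if i % prime == 0:
--         isPrime = False
--         break
--     if isPrime:
--       primes.append(i)
--   return primes
--
-- def solve(N, J):
--   primes = findPrimes(1000)
--   start, end = generateBounds(N)
--   current = copy.deepcopy(start)
--   answers = []
--   while current[0] == '1':
--     if len(answers) == J:
--       break
--     temp = [binaryStringToBase(current, 10)]
--     for i in range (2, 10 + 1):
--       number = binaryStringToBase(current, i)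
--       for prime in primes:
--         if number % prime == 0:
--           temp.append(prime)
--           break
--     if len(temp) == 10:
--       answers.append(temp)
--     current = binaryStringIncrement(current)
--   return answers
-- ===== SOURCE B (Python) =====
-- def _sieve(n):
--     # repeated-filter sieve: peel off the least remaining number (a prime) and
--     # drop all of its multiples from the pool
--     primes = []
--     nums = list(range(2, n))
--     while nums:
--         p = nums[0]
--         primes.append(p)
--         nums = [x for x in nums if x % p != 0]
--     return primes
--
--
-- def solve(N, J):
--     if N < 2:
--         return []
--     primes = _sieve(1000)
--     answers = []
--     # DFS over the middle bits with an explicit stack; each frame carries the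
--     # partial Horner reading of the current prefix in every base 2..10, so a
--     # prefix is evaluated once and shared by all candidates extending it.
--     stack = [(N - 2, [1] * 9)]
--     while stack:
--         if len(answers) == J:
--             break
--         k, vals = stack.pop()
--         if k == 0:
--             finals = [v * b + 1 for b, v in zip(range(2, 11), vals)]
--             row = [finals[8]]
--             for v in finals:
--                 d = next((p for p in primes if v % p == 0), None)
--                 if d is None:
--                     break
--                 row.append(d)
--             if len(row) == 10:
--                 answers.append(row)
--         else:
--             stack.append((k - 1, [v * b + 1 for b, v in zip(range(2, 11), vals)]))
--             stack.append((k - 1, [v * b for b, v in zip(range(2, 11), vals)]))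
--     return answers
-- ===== Notes on version B (the rewrite author's own statement) =====
-- stated objective: alternative
-- what changed: B replaces A's increment-a-digit-string-and-reread loop by a DFS over the middle bits with an explicit stack whose frames carry the partial Horner reading of the shared prefix in every base 2..10 (each prefix is evaluated once and reused by all candidates extending it; no digit string, carry loop or deepcopy exists at all), primes below 1000 come from a repeated-filter sieve (peel the least remaining number, drop its multiples) instead of A's trial division by previously found primes, and a candidate is abandoned at the first base without a small prime divisor.
import Mathlib
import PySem

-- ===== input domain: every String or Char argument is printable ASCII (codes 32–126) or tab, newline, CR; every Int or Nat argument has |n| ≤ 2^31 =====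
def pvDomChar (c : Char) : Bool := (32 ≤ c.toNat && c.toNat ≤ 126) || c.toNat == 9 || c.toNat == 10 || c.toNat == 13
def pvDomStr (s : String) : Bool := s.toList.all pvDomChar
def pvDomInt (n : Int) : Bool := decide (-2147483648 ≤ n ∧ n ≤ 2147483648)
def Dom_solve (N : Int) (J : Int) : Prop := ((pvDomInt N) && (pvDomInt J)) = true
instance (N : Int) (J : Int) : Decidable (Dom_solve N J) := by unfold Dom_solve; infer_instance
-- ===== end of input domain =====

-- B replaces A's digit-string increment loop (re-reading each candidate in every base) by a
-- stack DFS over the middle bits carrying incremental Horner readings of the shared prefix in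
-- all bases 2..10, and a repeated-filter sieve instead of trial division.

-- ===== PORT A =====

-- inner 'for prime in primes: if isPrime …: break' of findPrimes
def trialIsPrime (i : Int) : List Int → Bool
  | [] => true
  | p :: ps => if PySem.Int.mod i p = 0 then false else trialIsPrime i ps

def findPrimes (n : Int) : List Int :=
  -- primes starts as [2, 3]; range(primes[-1] + 2, N, 2)
  let primes : List Int := [2, 3]
  (PySem.List.pyRange ((PySem.List.pyGet? primes (-1)).getD 0 + 2) n 2).foldl
    (fun primes i => if trialIsPrime i primes then primes ++ [i] else primes) primes

def generateBounds (N : Int) : List String × List String :=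
  if N < 2 then ([""], [""])
  else
    -- the two while-loops pad to length N-1 with '0' (resp. '1'), then append '1'; here N ≥ 2
    let start := ["1"] ++ List.replicate ((N - 1).toNat - 1) "0" ++ ["1"]
    let stop := ["1"] ++ List.replicate ((N - 1).toNat - 1) "1" ++ ["1"]
    (start, stop)

-- int(ch) raises on non-digit strings; in solve every entry is "0"/"1", so the .getD 0 default is never used
def binaryStringToBase (s : List String) (base : Int) : Int :=
  s.foldl (fun result ch => result * base + (PySem.Int.ofStr? ch).getD 0) 0

-- the loop of binaryStringIncrement walks indices len-2 .. 0 flipping '1'→'0' until the first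
-- '0' (flipped to '1'): i.e. it increments the reversed prefix before the last element
def incRevA : List String → List String
  | [] => []
  | c :: rest => if c = "0" then "1" :: rest else "0" :: incRevA rest

def binaryStringIncrement (s : List String) : List String :=
  (incRevA s.dropLast.reverse).reverse ++ s.drop (s.length - 1)

-- inner 'for prime in primes: … break' of solve
def firstDivA (number : Int) : List Int → Option Int
  | [] => none
  | p :: ps => if PySem.Int.mod number p = 0 then some p else firstDivA number ps

-- the while loop of solve; fuel 2^(current.length) strictly bounds its iteration count
-- (the leading digit drops to '0' after at most 2^(len-2)+1 rounds), so it is only a guard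
def solveLoop (primes : List Int) (J : Int) : Nat → List String → List (List Int) → List (List Int)
  | 0, _, answers => answers
  | fuel + 1, current, answers =>
    if (PySem.List.pyGet? current 0).getD "" = "1" then
      if (answers.length : Int) = J then answers
      else
        let temp := (PySem.List.pyRange 2 (10 + 1) 1).foldl
          (fun t i =>
            match firstDivA (binaryStringToBase current i) primes with
            | some p => t ++ [p]
            | none => t) [binaryStringToBase current 10]
        let answers' := if temp.length = 10 then answers ++ [temp] else answers
        solveLoop primes J fuel (binaryStringIncrement current) answers'
    else answers

def solve (N : Int) (J : Int) : List (List Int) :=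
  let primes := findPrimes 1000
  let bounds := generateBounds N
  solveLoop primes J (2 ^ bounds.1.length) bounds.1 []

-- ===== PORT B =====

-- _sieve's 'while nums' loop: peel nums[0] (a prime), filter out its multiples; each
-- iteration strictly shrinks nums, so the initial length is a fuel that is only a guard
def sieveLoop : Nat → List Int → List Int → List Int
  | 0, primes, _ => primes
  | fuel + 1, primes, nums =>
    match nums with
    | [] => primes
    | p :: _ => sieveLoop fuel (primes ++ [p]) (nums.filter (fun x => ¬ PySem.Int.mod x p = 0))

def sieve (n : Int) : List Int :=
  sieveLoop (PySem.List.pyRange 2 n 1).length [] (PySem.List.pyRange 2 n 1)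

-- next((p for p in primes if v % p == 0), None)
def firstDiv (primes : List Int) (v : Int) : Option Int :=
  match primes with
  | [] => none
  | p :: ps => if PySem.Int.mod v p = 0 then some p else firstDiv ps v

-- 'for v in finals: d = next(…); if d is None: break; row.append(d)'
def rowFor (primes : List Int) : List Int → List Int → List Int
  | row, [] => row
  | row, v :: vs =>
    match firstDiv primes v with
    | none => row
    | some d => rowFor primes (row ++ [d]) vs

-- the 'while stack' DFS; each frame is (k, vals) with vals the partial readings in bases 2..10.
-- Fuel bounds the iteration count (the DFS tree of the initial frame has 2^(k+1)-1 nodes), so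
-- it is only a guard; frames pushed bit-0 first so pop order is lexicographic.
def dfsLoop (pr : List Int) (J : Int) : Nat → List (Int × List Int) → List (List Int) → List (List Int)
  | _, [], ans => ans
  | 0, _ :: _, ans => ans
  | fuel + 1, (k, vals) :: stack, ans =>
    if (ans.length : Int) = J then ans
    else if k = 0 then
      let finals := (List.zip (PySem.List.pyRange 2 11 1) vals).map (fun bv => bv.2 * bv.1 + 1)
      let row := rowFor pr [(PySem.List.pyGet? finals 8).getD 0] finals
      dfsLoop pr J fuel stack (if row.length = 10 then ans ++ [row] else ans)
    else
      dfsLoop pr J fuel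
        ((k - 1, (List.zip (PySem.List.pyRange 2 11 1) vals).map (fun bv => bv.2 * bv.1)) ::
         (k - 1, (List.zip (PySem.List.pyRange 2 11 1) vals).map (fun bv => bv.2 * bv.1 + 1)) :: stack) ans

def solve_alt (N : Int) (J : Int) : List (List Int) :=
  if N < 2 then []
  else
    let primes := sieve 1000
    dfsLoop primes J (2 ^ N.toNat) [(N - 2, List.replicate 9 1)] []

-- ===== PRECONDITION & SPEC =====
def Spec_solve (N : Int) (J : Int) (out : List (List Int)) : Prop := out = solve_alt N J
instance (N : Int) (J : Int) (out : List (List Int)) : Decidable (Spec_solve N J out) := by unfold Spec_solve; infer_instance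

-- ===== CLAIM (what is proved, stated in full; the proofs are below) =====
def Claim_equal_solve : Prop := ∀ (N : Int) (J : Int), Dom_solve N J → Spec_solve N J (solve N J)

-- ===== LEMMAS AND PROOFS =====

-- proof-side: the bit list of an integer (MSB first) and its Horner reading in a base
def bitsLoop (c : Int) (out : List Int) : List Int :=
  if 0 < c then bitsLoop (c / 2) (out ++ [c % 2]) else out
  termination_by c.toNat
  decreasing_by omega

def bitsB (c : Int) : List Int := (bitsLoop c []).reverse

def readB (bits : List Int) (base : Int) : Int :=
  bits.foldl (fun v d => v * base + d) 0

-- proof-side view of a digit list as A's list of one-character strings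
def toStrs (l : List Int) : List String := l.map (fun d => if d = 1 then "1" else "0")

-- proof-side binary increment on an LSB-first digit list (mirror of incRevA on digits)
def incB : List Int → List Int
  | [] => []
  | d :: rest => if d = 0 then 1 :: rest else 0 :: incB rest

def BinL (l : List Int) : Prop := ∀ d ∈ l, d = 0 ∨ d = 1

-- proof-side common semantics: the candidate values of a DFS frame, the per-candidate step,
-- the runner over a candidate list, the ascending odd-number list, frame values, node count
def valsOf (p : Int) : List Int := (PySem.List.pyRange 2 11 1).map (fun b => readB (bitsB p) b)

def stepCand (pr : List Int) (ans : List (List Int)) (c : Int) : List (List Int) :=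
  let row := rowFor pr [(PySem.List.pyGet? (valsOf c) 8).getD 0] (valsOf c)
  if row.length = 10 then ans ++ [row] else ans

def runCands (pr : List Int) (J : Int) : List Int → List (List Int) → List (List Int)
  | [], ans => ans
  | c :: cs, ans => if (ans.length : Int) = J then ans else runCands pr J cs (stepCand pr ans c)

def oddList (c bound : Int) : List Int :=
  if c < bound then c :: oddList (c + 2) bound else []
  termination_by (bound - c).toNat
  decreasing_by omega

def leafSeq : Nat → Int → List Int
  | 0, p => [2 * p + 1]
  | k + 1, p => leafSeq k (2 * p) ++ leafSeq k (2 * p + 1)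

def nodesOf : List (Nat × Int) → Nat
  | [] => 0
  | (k, _) :: rest => (2 ^ (k + 1) - 1) + nodesOf rest

def aFold (pr : List Int) (cur : List String) (bl : List Int) (t : List Int) : List Int :=
  bl.foldl (fun t i =>
    match firstDivA (binaryStringToBase cur i) pr with
    | some p => t ++ [p]
    | none => t) t

set_option maxRecDepth 1000000 in
theorem primes_eq : findPrimes 1000 = sieve 1000 := by decide

theorem bitsLoop_unfold (c : Int) (out : List Int) :
    bitsLoop c out = if 0 < c then bitsLoop (c / 2) (out ++ [c % 2]) else out := by
  rw [bitsLoop]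

theorem bitsLoop_acc : ∀ (n : Nat) (c : Int), c.toNat ≤ n → ∀ out,
    bitsLoop c out = out ++ bitsLoop c [] := by
  intro n
  induction n with
  | zero =>
    intro c hc out
    rw [bitsLoop_unfold, bitsLoop_unfold c []]
    have : ¬ 0 < c := by omega
    simp [this]
  | succ n ih =>
    intro c hc out
    by_cases h : 0 < c
    · rw [bitsLoop_unfold, bitsLoop_unfold c [], if_pos h, if_pos h]
      have hlt : (c / 2).toNat ≤ n := by omega
      rw [ih (c / 2) hlt (out ++ [c % 2]), ih (c / 2) hlt ([] ++ [c % 2])]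
      simp
    · rw [bitsLoop_unfold, bitsLoop_unfold c [], if_neg h, if_neg h]
      simp

theorem bitsB_nonpos (c : Int) (h : c ≤ 0) : bitsB c = [] := by
  rw [bitsB, bitsLoop_unfold, if_neg (by omega)]
  rfl

theorem bitsB_step (c : Int) (h : 1 ≤ c) : bitsB c = bitsB (c / 2) ++ [c % 2] := by
  rw [bitsB, bitsLoop_unfold, if_pos (by omega),
    bitsLoop_acc (c / 2).toNat (c / 2) le_rfl, List.nil_append]
  simp [bitsB]

theorem bitsB_one : bitsB 1 = [1] := by
  rw [bitsB_step 1 le_rfl]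
  norm_num [bitsB_nonpos 0 le_rfl]

theorem bitsB_pow (k : Nat) : bitsB (2 ^ k) = 1 :: List.replicate k 0 := by
  induction k with
  | zero => simpa using bitsB_one
  | succ k ih =>
    have h1 : (0:Int) < 2 ^ (k + 1) := by positivity
    rw [bitsB_step _ (by omega)]
    have h2 : (2:Int) ^ (k + 1) = 2 * 2 ^ k := by ring
    have hd : (2:Int) ^ (k + 1) / 2 = 2 ^ k := by omega
    have hm : (2:Int) ^ (k + 1) % 2 = 0 := by omega
    rw [hd, hm, ih]
    simp [List.replicate_succ']

theorem bitsB_pow_add_one (k : Nat) (hk : 1 ≤ k) :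
    bitsB (2 ^ k + 1) = 1 :: (List.replicate (k - 1) 0 ++ [1]) := by
  have h1 : (0:Int) < 2 ^ k := by positivity
  rw [bitsB_step _ (by omega)]
  obtain ⟨j, rfl⟩ : ∃ j, k = j + 1 := ⟨k - 1, by omega⟩
  have h2 : (2:Int) ^ (j + 1) = 2 * 2 ^ j := by ring
  have hd : ((2:Int) ^ (j + 1) + 1) / 2 = 2 ^ j := by omega
  have hm : ((2:Int) ^ (j + 1) + 1) % 2 = 1 := by omega
  rw [hd, hm, bitsB_pow]
  simp

theorem bitsB_ones : ∀ (k : Nat), 1 ≤ k → bitsB (2 ^ k - 1) = List.replicate k 1 := by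
  intro k
  induction k with
  | zero => omega
  | succ k ih =>
    intro _
    by_cases hk : k = 0
    · subst hk; simpa using bitsB_one
    · have h2 : (2:Int) ^ (k + 1) = 2 * 2 ^ k := by ring
      have h1 : (0:Int) < 2 ^ k := by positivity
      rw [bitsB_step _ (by omega)]
      have hd : ((2:Int) ^ (k + 1) - 1) / 2 = 2 ^ k - 1 := by omega
      have hm : ((2:Int) ^ (k + 1) - 1) % 2 = 1 := by omega
      rw [hd, hm, ih (by omega), List.replicate_succ']

theorem bitsB_length : ∀ (k : Nat) (c : Int), 2 ^ k ≤ c → c < 2 ^ (k + 1) →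
    (bitsB c).length = k + 1 := by
  intro k
  induction k with
  | zero =>
    intro c h1 h2
    have : c = 1 := by norm_num at h1 h2; omega
    subst this; simp [bitsB_one]
  | succ k ih =>
    intro c h1 h2
    have h3 : (2:Int) ^ (k + 1) = 2 * 2 ^ k := by ring
    have h4 : (2:Int) ^ (k + 2) = 2 * 2 ^ (k + 1) := by ring
    have h0 : (0:Int) < 2 ^ k := by positivity
    rw [bitsB_step c (by omega), List.length_append]
    have := ih (c / 2) (by omega) (by omega)
    simp [this]

theorem bitsB_head : ∀ (n : Nat) (c : Int), c.toNat ≤ n → 0 < c →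
    ∃ l, bitsB c = 1 :: l := by
  intro n
  induction n with
  | zero => intro c hc h; omega
  | succ n ih =>
    intro c hc h
    by_cases h1 : c = 1
    · exact ⟨[], by rw [h1, bitsB_one]⟩
    · obtain ⟨l, hl⟩ := ih (c / 2) (by omega) (by omega)
      exact ⟨l ++ [c % 2], by rw [bitsB_step c (by omega), hl]; simp⟩

theorem bitsB_bin : ∀ (n : Nat) (c : Int), c.toNat ≤ n → BinL (bitsB c) := by
  intro n
  induction n with
  | zero =>
    intro c hc
    rw [bitsB_nonpos c (by omega)]
    intro d hd; cases hd
  | succ n ih =>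
    intro c hc
    by_cases h : 0 < c
    · rw [bitsB_step c (by omega)]
      intro d hd
      rcases List.mem_append.mp hd with h1 | h1
      · exact ih (c / 2) (by omega) d h1
      · simp at h1; omega
    · rw [bitsB_nonpos c (by omega)]
      intro d hd; cases hd

theorem lift : ∀ (l : List Int), BinL l → incRevA (toStrs l) = toStrs (incB l) := by
  intro l
  induction l with
  | nil => intro _; rfl
  | cons d rest ih =>
    intro hB
    have hrest : BinL rest := fun x hx => hB x (by simp [hx])
    rcases hB d (by simp) with h | h <;> subst h
    · simp [toStrs, incRevA, incB]
    · simp only [toStrs, List.map_cons, incRevA, incB]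
      norm_num
      simpa [toStrs] using ih hrest

theorem incB_ones : ∀ (k : Nat), incB (List.replicate k 1) = List.replicate k 0 := by
  intro k
  induction k with
  | zero => rfl
  | succ k ih => simp [List.replicate_succ, incB, ih]

theorem incShape (u : List Int) (hu : BinL u) :
    binaryStringIncrement (toStrs u ++ ["1"]) = toStrs ((incB u.reverse).reverse) ++ ["1"] := by
  unfold binaryStringIncrement
  have h1 : (toStrs u ++ ["1"]).dropLast = toStrs u := by simp
  have h2 : (toStrs u ++ ["1"]).drop ((toStrs u ++ ["1"]).length - 1) = ["1"] := by
    simp [toStrs]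
  rw [h1, h2]
  have h3 : (toStrs u).reverse = toStrs u.reverse := by simp [toStrs]
  rw [h3, lift _ (fun d hd => hu d (List.mem_reverse.mp hd))]
  have h4 : (toStrs (incB u.reverse)).reverse = toStrs ((incB u.reverse).reverse) := by
    simp [toStrs]
  rw [h4]

theorem incB_correct : ∀ (n : Nat) (q : Int), q.toNat ≤ n → 1 ≤ q →
    q + 1 < 2 ^ ((bitsB q).length) →
    incB (bitsB q).reverse = (bitsB (q + 1)).reverse := by
  intro n
  induction n with
  | zero => intro q h1 h2 h3; omega
  | succ n ih =>
    intro q hq h1 hlt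
    by_cases hone : q = 1
    · subst hone
      rw [bitsB_one] at hlt
      norm_num at hlt
    · have h2q : 2 ≤ q := by omega
      have hstep := bitsB_step q (by omega)
      rw [hstep, List.reverse_append, List.reverse_singleton, List.singleton_append]
      have hlen : (bitsB q).length = (bitsB (q / 2)).length + 1 := by
        rw [hstep]; simp
      have hpow : (2:Int) ^ ((bitsB (q / 2)).length + 1) = 2 * 2 ^ (bitsB (q / 2)).length := by
        ring
      rcases Int.emod_two_eq_zero_or_one q with hm | hm
      · rw [hm]
        simp only [incB]
        have hq1 : bitsB (q + 1) = bitsB ((q + 1) / 2) ++ [(q + 1) % 2] :=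
          bitsB_step _ (by omega)
        have e1 : (q + 1) / 2 = q / 2 := by omega
        have e2 : (q + 1) % 2 = 1 := by omega
        rw [hq1, e1, e2, List.reverse_append, List.reverse_singleton, List.singleton_append]
        norm_num
      · rw [hm]
        simp only [incB]
        have ihq := ih (q / 2) (by omega) (by omega)
          (by rw [hlen] at hlt; rw [hpow] at hlt; omega)
        rw [ihq]
        have hq1 : bitsB (q + 1) = bitsB ((q + 1) / 2) ++ [(q + 1) % 2] :=
          bitsB_step _ (by omega)
        have e1 : (q + 1) / 2 = q / 2 + 1 := by omega
        have e2 : (q + 1) % 2 = 0 := by omega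
        rw [hq1, e1, e2, List.reverse_append, List.reverse_singleton, List.singleton_append]
        norm_num

theorem headStop (pr : List Int) (J : Int) (f : Nat) (cur : List String)
    (ans : List (List Int)) (h : ¬ (PySem.List.pyGet? cur 0).getD "" = "1") :
    solveLoop pr J f cur ans = ans := by
  cases f with
  | zero => rfl
  | succ f => simp only [solveLoop, if_neg h]

theorem valEq (b : Int) : ∀ (l : List Int), BinL l → ∀ (acc : Int),
    (toStrs l).foldl (fun result ch => result * b + (PySem.Int.ofStr? ch).getD 0) acc
      = l.foldl (fun v d => v * b + d) acc := by
  intro l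
  induction l with
  | nil => intro _ acc; rfl
  | cons d rest ih =>
    intro hB acc
    have hrest : BinL rest := fun x hx => hB x (by simp [hx])
    rcases hB d (by simp) with h | h <;> subst h
    · have h0 : (PySem.Int.ofStr? (if (0:Int) = 1 then "1" else "0")).getD 0 = 0 := by decide
      simp only [toStrs, List.map_cons, List.foldl_cons, h0]
      simpa [toStrs] using ih hrest (acc * b + 0)
    · have h1 : (PySem.Int.ofStr? "1").getD 0 = 1 := by decide
      simp only [toStrs, List.map_cons, List.foldl_cons, if_pos, h1]
      simpa [toStrs] using ih hrest (acc * b + 1)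

theorem bsb_eq_readB (l : List Int) (hB : BinL l) (b : Int) :
    binaryStringToBase (toStrs l) b = readB l b := valEq b l hB 0

theorem firstDiv_eq (v : Int) : ∀ (l : List Int), firstDiv l v = firstDivA v l := by
  intro l
  induction l with
  | nil => rfl
  | cons p ps ih => simp only [firstDiv, firstDivA, ih]

theorem foldA_len_le (pr : List Int) (cur : List String) :
    ∀ (bl : List Int) (t : List Int),
    (aFold pr cur bl t).length ≤ t.length + bl.length := by
  intro bl
  induction bl with
  | nil => intro t; simp [aFold]
  | cons b bs ih =>
    intro t
    simp only [aFold, List.foldl_cons]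
    cases h : firstDivA (binaryStringToBase cur b) pr with
    | none =>
      have := ih t
      simp only [aFold] at this
      simp only [List.length_cons]
      omega
    | some p =>
      have h2 := ih (t ++ [p])
      simp only [aFold] at h2
      have h3 : (t ++ [p]).length = t.length + 1 := by simp
      rw [h3] at h2
      simp only [List.length_cons]
      omega

theorem rowBridge (pr : List Int) (cur : List String) (c : Int)
    (hv : ∀ b, binaryStringToBase cur b = readB (bitsB c) b) :
    ∀ (bl : List Int) (t : List Int),
    (rowFor pr t (bl.map (fun b => readB (bitsB c) b)) = aFold pr cur bl t
       ∧ (rowFor pr t (bl.map (fun b => readB (bitsB c) b))).length = t.length + bl.length)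
    ∨ ((rowFor pr t (bl.map (fun b => readB (bitsB c) b))).length < t.length + bl.length
       ∧ (aFold pr cur bl t).length < t.length + bl.length) := by
  intro bl
  induction bl with
  | nil => intro t; exact Or.inl ⟨rfl, by simp [rowFor]⟩
  | cons b bs ih =>
    intro t
    have hstep : firstDiv pr (readB (bitsB c) b) = firstDivA (binaryStringToBase cur b) pr := by
      rw [hv b, firstDiv_eq]
    cases hdiv : firstDiv pr (readB (bitsB c) b) with
    | none =>
      right
      constructor
      · simp only [List.map_cons, rowFor, hdiv, List.length_cons]
        omega
      · simp only [aFold, List.foldl_cons, ← hstep, hdiv]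
        have := foldA_len_le pr cur bs t
        simp only [aFold] at this
        simp only [List.length_cons]
        omega
    | some d =>
      have hrec := ih (t ++ [d])
      have hlen : (t ++ [d]).length = t.length + 1 := by simp
      simp only [List.map_cons, rowFor, hdiv, List.length_cons]
      simp only [aFold, List.foldl_cons, ← hstep, hdiv]
      rcases hrec with ⟨hEq, hL⟩ | ⟨hL1, hL2⟩
      · left
        refine ⟨hEq, ?_⟩
        rw [hL, hlen]; omega
      · right
        simp only [aFold] at hL2
        rw [hlen] at hL1 hL2
        omega

theorem pyRange_2_11 : PySem.List.pyRange 2 11 1 = [2, 3, 4, 5, 6, 7, 8, 9, 10] := by decide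

theorem valsOf_get8 (c : Int) :
    (PySem.List.pyGet? (valsOf c) 8).getD 0 = readB (bitsB c) 10 := by
  simp [valsOf, pyRange_2_11, PySem.List.pyGet?, PySem.List.pyIdx?]

theorem stepEq (pr : List Int) (cur : List String) (c : Int)
    (hv : ∀ b, binaryStringToBase cur b = readB (bitsB c) b) (ans : List (List Int)) :
    (if ((PySem.List.pyRange 2 (10 + 1) 1).foldl
          (fun t i =>
            match firstDivA (binaryStringToBase cur i) pr with
            | some p => t ++ [p]
            | none => t) [binaryStringToBase cur 10]).length = 10 then
      ans ++ [(PySem.List.pyRange 2 (10 + 1) 1).foldl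
          (fun t i =>
            match firstDivA (binaryStringToBase cur i) pr with
            | some p => t ++ [p]
            | none => t) [binaryStringToBase cur 10]]
    else ans) = stepCand pr ans c := by
  have h11 : ((10:Int) + 1) = 11 := by norm_num
  have hbl9 : (PySem.List.pyRange 2 11 1).length = 9 := by decide
  have hfold : ∀ t, (PySem.List.pyRange 2 (10 + 1) 1).foldl
      (fun t i =>
        match firstDivA (binaryStringToBase cur i) pr with
        | some p => t ++ [p]
        | none => t) t = aFold pr cur (PySem.List.pyRange 2 11 1) t := by
    intro t; rw [h11]; rfl
  rw [hfold, hv 10]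
  unfold stepCand
  rw [valsOf_get8]
  have hB := rowBridge pr cur c hv (PySem.List.pyRange 2 11 1) [readB (bitsB c) 10]
  have hvals : valsOf c = (PySem.List.pyRange 2 11 1).map (fun b => readB (bitsB c) b) := rfl
  rw [hvals]
  rcases hB with ⟨hEq, hL⟩ | ⟨hL1, hL2⟩
  · rw [hEq]
  · rw [hbl9] at hL1 hL2
    simp only [List.length_cons, List.length_nil] at hL1 hL2
    rw [if_neg (by omega), if_neg (by omega)]

theorem pyGet?_cons_zero (x : String) (rest : List String) :
    (PySem.List.pyGet? (x :: rest) 0).getD "" = x := by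
  simp [PySem.List.pyGet?, PySem.List.pyIdx?]

theorem solveLoop_succ (pr : List Int) (J : Int) (fuel : Nat) (cur : List String)
    (ans : List (List Int)) :
    solveLoop pr J (fuel + 1) cur ans =
      if (PySem.List.pyGet? cur 0).getD "" = "1" then
        if (ans.length : Int) = J then ans
        else
          solveLoop pr J fuel (binaryStringIncrement cur)
            (if ((PySem.List.pyRange 2 (10 + 1) 1).foldl
                (fun t i => match firstDivA (binaryStringToBase cur i) pr with
                  | some p => t ++ [p]
                  | none => t) [binaryStringToBase cur 10]).length = 10 then
              ans ++ [(PySem.List.pyRange 2 (10 + 1) 1).foldl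
                (fun t i => match firstDivA (binaryStringToBase cur i) pr with
                  | some p => t ++ [p]
                  | none => t) [binaryStringToBase cur 10]]
            else ans)
      else ans := rfl

theorem oddList_eq (c b : Int) :
    oddList c b = if c < b then c :: oddList (c + 2) b else [] := by
  rw [oddList]

theorem mainLoop (pr : List Int) (J : Int) (K : Nat) :
    ∀ (fuel : Nat) (c : Int) (ans : List (List Int)),
      c % 2 = 1 → 2 ^ (K + 1) ≤ c → c < 2 ^ (K + 2) →
      ((2:Int) ^ (K + 2) - c).toNat < 2 * fuel →
      solveLoop pr J fuel (toStrs (bitsB c)) ans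
        = runCands pr J (oddList c (2 ^ (K + 2))) ans := by
  intro fuel
  induction fuel with
  | zero => intro c ans h1 h2 h3 h4; omega
  | succ fuel ih =>
    intro c ans hodd hlo hhi hfuel
    have hp0 : (0:Int) < 2 ^ K := by positivity
    have hpow1 : (2:Int) ^ (K + 1) = 2 * 2 ^ K := by ring
    have hpow2 : (2:Int) ^ (K + 2) = 2 * 2 ^ (K + 1) := by ring
    have hc0 : 0 < c := by omega
    have ha : (2:Int) ^ K ≤ c / 2 := by omega
    have hb : c / 2 < 2 ^ (K + 1) := by omega
    have hbin : BinL (bitsB c) := bitsB_bin c.toNat c le_rfl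
    have hv : ∀ b, binaryStringToBase (toStrs (bitsB c)) b = readB (bitsB c) b :=
      fun b => bsb_eq_readB (bitsB c) hbin b
    obtain ⟨l0, hl0⟩ := bitsB_head c.toNat c le_rfl hc0
    have hhead : (PySem.List.pyGet? (toStrs (bitsB c)) 0).getD "" = "1" := by
      rw [hl0]
      simp only [toStrs, List.map_cons]
      rw [pyGet?_cons_zero]
      norm_num
    rw [solveLoop_succ, oddList_eq, if_pos hhi, if_pos hhead]
    simp only [runCands]
    by_cases hJ : (ans.length : Int) = J
    · rw [if_pos hJ, if_pos hJ]
    · rw [if_neg hJ, if_neg hJ]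
      rw [stepEq pr (toStrs (bitsB c)) c hv ans]
      -- step to the next candidate
      have hstep := bitsB_step c (by omega)
      rw [hodd] at hstep
      have hq1 : 1 ≤ c / 2 := by omega
      have hqlen : (bitsB (c / 2)).length = K + 1 := bitsB_length K (c / 2) ha hb
      have hcur : toStrs (bitsB c) = toStrs (bitsB (c / 2)) ++ ["1"] := by
        rw [hstep]; simp [toStrs]
      by_cases hwrap : c + 2 < 2 ^ (K + 2)
      · have hinc : binaryStringIncrement (toStrs (bitsB c)) = toStrs (bitsB (c + 2)) := by
          rw [hcur, incShape _ (fun d hd => bitsB_bin (c / 2).toNat (c / 2) le_rfl d hd)]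
          rw [incB_correct (c / 2).toNat (c / 2) le_rfl hq1
            (by rw [hqlen]; omega)]
          rw [List.reverse_reverse]
          have h5 : bitsB (c + 2) = bitsB ((c + 2) / 2) ++ [(c + 2) % 2] :=
            bitsB_step _ (by omega)
          have e1 : (c + 2) / 2 = c / 2 + 1 := by omega
          have e2 : (c + 2) % 2 = 1 := by omega
          rw [h5, e1, e2]
          simp [toStrs]
        rw [hinc]
        exact ih (c + 2) _ (by omega) (by omega) hwrap (by omega)
      · -- c is the last candidate: the middle bits wrap and both sides stop
        have hc2 : c = 2 ^ (K + 2) - 1 := by omega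
        have hbc : bitsB c = List.replicate (K + 2) 1 := by
          rw [hc2]; exact bitsB_ones (K + 2) (by omega)
        have hinc : binaryStringIncrement (toStrs (bitsB c))
            = toStrs (List.replicate (K + 1) 0) ++ ["1"] := by
          have hrep : toStrs (bitsB c) = toStrs (List.replicate (K + 1) 1) ++ ["1"] := by
            rw [hbc, List.replicate_succ']
            simp [toStrs]
          rw [hrep, incShape _ (by intro d hd; simp at hd; omega)]
          rw [List.reverse_replicate, incB_ones, List.reverse_replicate]
        rw [hinc, headStop _ _ _ _ _ (by
          simp only [toStrs, List.replicate_succ, List.map_cons, List.cons_append]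
          rw [pyGet?_cons_zero]
          decide)]
        rw [oddList_eq, if_neg (by omega)]
        rfl

-- ===== B-side bridge: the DFS equals the candidate runner =====

theorem zip_map_map (l : List Int) (f : Int → Int) (g : Int × Int → Int) :
    (List.zip l (l.map f)).map g = l.map (fun b => g (b, f b)) := by
  induction l with
  | nil => rfl
  | cons a l ih => simp [ih]

theorem readB_append (l : List Int) (d b : Int) :
    readB (l ++ [d]) b = readB l b * b + d := by
  simp [readB, List.foldl_append]

theorem bitsB_bit (p bit : Int) (hp : 1 ≤ p) (hbit : bit = 0 ∨ bit = 1) :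
    bitsB (2 * p + bit) = bitsB p ++ [bit] := by
  have h := bitsB_step (2 * p + bit) (by omega)
  have e1 : (2 * p + bit) / 2 = p := by omega
  have e2 : (2 * p + bit) % 2 = bit := by omega
  rw [h, e1, e2]

theorem vals_update (p bit : Int) (hp : 1 ≤ p) (hbit : bit = 0 ∨ bit = 1) :
    (List.zip (PySem.List.pyRange 2 11 1) (valsOf p)).map (fun bv => bv.2 * bv.1 + bit)
      = valsOf (2 * p + bit) := by
  unfold valsOf
  rw [zip_map_map]
  refine List.map_congr_left ?_
  intro b _
  rw [bitsB_bit p bit hp hbit, readB_append]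

theorem vals_update0 (p : Int) (hp : 1 ≤ p) :
    (List.zip (PySem.List.pyRange 2 11 1) (valsOf p)).map (fun bv => bv.2 * bv.1)
      = valsOf (2 * p) := by
  have h := vals_update p 0 hp (Or.inl rfl)
  simpa using h

theorem leafSeq_ne_nil : ∀ (k : Nat) (p : Int), leafSeq k p ≠ [] := by
  intro k
  induction k with
  | zero => intro p; simp [leafSeq]
  | succ k ih => intro p; simp [leafSeq, ih]

theorem dfs_eq (pr : List Int) (J : Int) :
    ∀ (fuel : Nat) (frames : List (Nat × Int)) (ans : List (List Int)),
      nodesOf frames ≤ fuel → (∀ f ∈ frames, 1 ≤ f.2) →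
      dfsLoop pr J fuel (frames.map (fun f => ((f.1 : Int), valsOf f.2))) ans
        = runCands pr J (frames.flatMap (fun f => leafSeq f.1 f.2)) ans := by
  intro fuel
  induction fuel with
  | zero =>
    intro frames ans hn hp
    cases frames with
    | nil => rfl
    | cons f rest =>
      obtain ⟨k, p⟩ := f
      exfalso
      have h1 : 1 ≤ 2 ^ k := Nat.one_le_two_pow
      have h2 : 2 ^ (k + 1) = 2 * 2 ^ k := by ring
      simp only [nodesOf] at hn
      omega
  | succ fuel ih =>
    intro frames ans hn hp
    cases frames with
    | nil => rfl
    | cons f rest =>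
      obtain ⟨k, p⟩ := f
      have hp1 : 1 ≤ p := hp (k, p) (by simp)
      have hprest : ∀ f ∈ rest, 1 ≤ f.2 := fun f hf => hp f (by simp [hf])
      obtain ⟨c0, cs0, hleaf⟩ : ∃ c0 cs0, leafSeq k p = c0 :: cs0 := by
        cases hl : leafSeq k p with
        | nil => exact absurd hl (leafSeq_ne_nil k p)
        | cons c0 cs0 => exact ⟨c0, cs0, rfl⟩
      simp only [List.map_cons, dfsLoop]
      by_cases hJ : (ans.length : Int) = J
      · rw [if_pos hJ]
        simp only [List.flatMap_cons, hleaf, List.cons_append, runCands, if_pos hJ]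
      · rw [if_neg hJ]
        cases k with
        | zero =>
          rw [if_pos (by norm_num)]
          rw [vals_update p 1 hp1 (Or.inr rfl)]
          have hrow : (if (rowFor pr [(PySem.List.pyGet? (valsOf (2 * p + 1)) 8).getD 0]
              (valsOf (2 * p + 1))).length = 10 then
                ans ++ [rowFor pr [(PySem.List.pyGet? (valsOf (2 * p + 1)) 8).getD 0]
                  (valsOf (2 * p + 1))]
              else ans) = stepCand pr ans (2 * p + 1) := rfl
          rw [hrow]
          have hn' : nodesOf rest ≤ fuel := by
            simp only [nodesOf] at hn
            omega
          rw [ih rest (stepCand pr ans (2 * p + 1)) hn' hprest]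
          simp only [List.flatMap_cons, leafSeq, List.cons_append, List.nil_append, runCands,
            if_neg hJ]
        | succ m =>
          rw [if_neg (by
            intro h
            have : (m : Int) + 1 = 0 := by push_cast at h ⊢; omega
            omega)]
          have hm1 : ((m : Int) + 1 - 1) = (m : Int) := by ring
          have hcast : ((Nat.succ m : Nat) : Int) = (m : Int) + 1 := by push_cast; ring
          rw [hcast, hm1]
          rw [vals_update0 p hp1, vals_update p 1 hp1 (Or.inr rfl)]
          have hframes' : ((m : Int), valsOf (2 * p)) :: ((m : Int), valsOf (2 * p + 1)) ::
              rest.map (fun f => ((f.1 : Int), valsOf f.2))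
              = ((m, 2 * p) :: (m, 2 * p + 1) :: rest).map
                  (fun f => ((f.1 : Int), valsOf f.2)) := by simp
          rw [hframes']
          have hn' : nodesOf ((m, 2 * p) :: (m, 2 * p + 1) :: rest) ≤ fuel := by
            simp only [nodesOf] at hn ⊢
            have h1 : 1 ≤ 2 ^ (m + 1) := Nat.one_le_two_pow
            have h2 : 2 ^ (m + 1 + 1) = 2 * 2 ^ (m + 1) := by ring
            omega
          have hps : ∀ f ∈ ((m, 2 * p) :: (m, 2 * p + 1) :: rest), 1 ≤ f.2 := by
            intro f hf
            simp only [List.mem_cons] at hf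
            rcases hf with h | h | h
            · subst h; simp; omega
            · subst h; simp; omega
            · exact hprest f h
          rw [ih _ ans hn' hps]
          have hflat : ((m, 2 * p) :: (m, 2 * p + 1) :: rest).flatMap
              (fun f => leafSeq f.1 f.2)
              = ((m + 1, p) :: rest).flatMap (fun f => leafSeq f.1 f.2) := by
            simp only [List.flatMap_cons, leafSeq, List.append_assoc]
          rw [hflat]

-- ===== the leaf sequence is the odd range =====

theorem odd_skip : ∀ (n : Nat) (a b : Int), (b - a).toNat ≤ n → (b - a) % 2 = 1 →
    oddList a b = oddList a (b + 1) := by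
  intro n
  induction n with
  | zero =>
    intro a b hle hpar
    rw [oddList_eq a b, oddList_eq a (b + 1), if_neg (by omega), if_neg (by omega)]
  | succ n ih =>
    intro a b hle hpar
    by_cases hab : a < b
    · rw [oddList_eq a b, oddList_eq a (b + 1), if_pos hab, if_pos (by omega)]
      rw [ih (a + 2) b (by omega) (by omega)]
    · rw [oddList_eq a b, oddList_eq a (b + 1), if_neg hab, if_neg (by omega)]

theorem odd_split : ∀ (n : Nat) (a m c : Int), (m - a).toNat ≤ n → (m - a) % 2 = 0 →
    a ≤ m → m ≤ c → oddList a c = oddList a m ++ oddList m c := by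
  intro n
  induction n with
  | zero =>
    intro a m c hle hpar ham hmc
    have hma : m = a := by omega
    subst hma
    rw [oddList_eq m m, if_neg (by omega)]
    simp
  | succ n ih =>
    intro a m c hle hpar ham hmc
    by_cases ha : a = m
    · subst ha
      rw [oddList_eq a a, if_neg (by omega)]
      simp
    · have h2 : a + 2 ≤ m := by omega
      rw [oddList_eq a c, if_pos (by omega)]
      rw [oddList_eq a m, if_pos (by omega)]
      rw [ih (a + 2) m c (by omega) (by omega) (by omega) hmc]
      simp

theorem leafSeq_odd : ∀ (k : Nat) (p : Int),
    leafSeq k p = oddList (2 ^ (k + 1) * p + 1) (2 ^ (k + 1) * p + 2 ^ (k + 1)) := by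
  intro k
  induction k with
  | zero =>
    intro p
    simp only [leafSeq]
    rw [oddList_eq (2 ^ (0 + 1) * p + 1) (2 ^ (0 + 1) * p + 2 ^ (0 + 1)),
      if_pos (by omega)]
    rw [oddList_eq, if_neg (by omega)]
    norm_num
  | succ k ih =>
    intro p
    have hH2 : (2:Int) ^ (k + 1) = 2 * 2 ^ k := by ring
    have hH0 : (0:Int) < 2 ^ k := by positivity
    have hpow : (2:Int) ^ (k + 1 + 1) = 2 * 2 ^ (k + 1) := by ring
    simp only [leafSeq]
    rw [ih (2 * p), ih (2 * p + 1)]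
    have e1 : (2:Int) ^ (k + 1) * (2 * p) = 2 ^ (k + 1 + 1) * p := by ring
    have e2 : (2:Int) ^ (k + 1) * (2 * p + 1) = 2 ^ (k + 1 + 1) * p + 2 ^ (k + 1) := by ring
    rw [e1, e2]
    -- split the big range at the midpoint; the midpoint bound itself is even, hence skipped
    have hskip := odd_skip ((2:Int) ^ (k + 1)).toNat (2 ^ (k + 1 + 1) * p + 1)
      (2 ^ (k + 1 + 1) * p + 2 ^ (k + 1)) (by omega) (by omega)
    have hsplit := odd_split ((2:Int) ^ (k + 1)).toNat (2 ^ (k + 1 + 1) * p + 1)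
      (2 ^ (k + 1 + 1) * p + 2 ^ (k + 1) + 1) (2 ^ (k + 1 + 1) * p + 2 ^ (k + 1 + 1))
      (by omega) (by omega) (by omega) (by omega)
    rw [hskip]
    rw [hsplit]
    congr 1
    congr 1
    omega

theorem headEmpty : ¬ (PySem.List.pyGet? ([""] : List String) 0).getD "" = "1" := by decide

theorem valsOf_one : valsOf 1 = List.replicate 9 1 := by
  simp [valsOf, pyRange_2_11, bitsB_one, readB]

-- ===== VERDICT (by name: the statement is the Claim_ definition above) =====
theorem solve_spec : Claim_equal_solve := by
  intro N J _
  unfold Spec_solve solve solve_alt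
  by_cases hN : N < 2
  · rw [if_pos hN]
    unfold generateBounds
    rw [if_pos hN]
    exact headStop _ _ _ _ _ headEmpty
  · rw [if_neg hN]
    obtain ⟨K, hK⟩ : ∃ K, N.toNat = K + 2 := ⟨N.toNat - 2, by omega⟩
    have hp0 : (0:Int) < 2 ^ K := by positivity
    have hpow1 : (2:Int) ^ (K + 1) = 2 * 2 ^ K := by ring
    have hpow2 : (2:Int) ^ (K + 2) = 2 * 2 ^ (K + 1) := by ring
    unfold generateBounds
    rw [if_neg hN]
    rw [primes_eq]
    have e1 : (N - 1).toNat = K + 1 := by omega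
    have e3 : (N - 1).toNat - 1 = K := by omega
    simp only [e1, Nat.add_sub_cancel]
    -- A side
    have hstart : (["1"] ++ List.replicate K "0" ++ ["1"] : List String)
        = toStrs (bitsB ((2:Int) ^ (K + 1) + 1)) := by
      rw [bitsB_pow_add_one (K + 1) (by omega)]
      simp [toStrs]
    have hlen : ((["1"] ++ List.replicate K "0" ++ ["1"] : List String)).length = K + 2 := by
      simp
    rw [hlen, hstart]
    rw [mainLoop _ J K (2 ^ (K + 2)) ((2:Int) ^ (K + 1) + 1) [] (by omega) (by omega)
      (by omega)
      (by have hcast : ((2 ^ (K + 2) : Nat) : Int) = (2:Int) ^ (K + 2) := by push_cast; ring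
          omega)]
    -- B side
    have hNK : N - 2 = ((K : Nat) : Int) := by omega
    have hframe : [((N - 2 : Int), (List.replicate 9 1 : List Int))]
        = ([(K, 1)] : List (Nat × Int)).map (fun f => ((f.1 : Int), valsOf f.2)) := by
      simp [hNK, valsOf_one]
    rw [hframe]
    rw [dfs_eq (sieve 1000) J (2 ^ N.toNat) [(K, 1)] []
      (by
        have hnode : nodesOf [(K, 1)] = 2 ^ (K + 1) - 1 := by simp [nodesOf]
        rw [hnode, hK]
        have h1 : 1 ≤ 2 ^ (K + 1) := Nat.one_le_two_pow
        have h2 : (2:Nat) ^ (K + 2) = 2 * 2 ^ (K + 1) := by ring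
        omega)
      (by
        intro f hf
        simp only [List.mem_singleton] at hf
        subst hf
        norm_num)]
    simp only [List.flatMap_cons, List.flatMap_nil, List.append_nil]
    have e4 : (2:Int) ^ (K + 1) * 1 + 1 = 2 ^ (K + 1) + 1 := by ring
    have e5 : (2:Int) ^ (K + 1) * 1 + 2 ^ (K + 1) = 2 ^ (K + 2) := by ring
    rw [leafSeq_odd K 1, e4, e5]
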